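-- pv_equiv track=rewrite | github.com/ljm7b2/OBSTstandardDeviation | obst_algorithms.py | sort_roots
-- ===== SOURCE A (Python) =====
-- def sort_roots(roots, min_val, comparisons):
--     min_roots = []
--     second_root = [(10000000000000000000000, 1)]
--     for val in roots:
--         if val[0] == min_val:
--             min_roots.append(val[-1])
--         else:
--             second_root.append(min(second_root.pop(), val))
--         comparisons[0] += 2
--     return min_roots, [second_root[0][-1]]
-- ===== SOURCE B (Python) =====
-- def sort_roots(roots, min_val, comparisons):
--     min_roots = [v[-1] for v in roots if v[0] == min_val]
--     others = [v for v in roots if v[0] != min_val]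
--     if roots:
--         comparisons[0] += 2 * len(roots)
--     return min_roots, [min(others, default=(10000000000000000000000, 1))[-1]]
-- ===== Notes on version B (the rewrite author's own statement) =====
-- stated objective: simpler
-- what changed: Replaces A's single stateful loop (running-min kept via a pop/append one-element list, plus incremental appends) by two comprehensions that split roots into matching and non-matching pairs and one batch min(others, default=sentinel) at the end; the comparison counter is bumped once by 2*len(roots).
import Mathlib
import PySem

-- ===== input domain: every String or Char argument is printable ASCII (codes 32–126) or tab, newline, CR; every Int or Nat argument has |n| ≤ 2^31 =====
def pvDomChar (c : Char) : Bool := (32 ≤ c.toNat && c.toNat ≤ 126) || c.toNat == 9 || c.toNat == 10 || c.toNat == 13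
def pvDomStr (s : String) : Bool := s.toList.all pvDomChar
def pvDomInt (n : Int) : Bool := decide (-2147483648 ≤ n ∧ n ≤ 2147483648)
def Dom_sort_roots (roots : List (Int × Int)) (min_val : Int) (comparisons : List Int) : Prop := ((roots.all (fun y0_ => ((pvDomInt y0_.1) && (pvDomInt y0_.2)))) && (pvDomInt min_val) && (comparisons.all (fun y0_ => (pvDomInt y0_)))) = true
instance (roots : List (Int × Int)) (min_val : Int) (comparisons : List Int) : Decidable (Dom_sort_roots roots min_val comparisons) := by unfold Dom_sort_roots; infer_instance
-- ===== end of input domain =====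

-- B replaces A's stateful running-min loop by two comprehensions (matching / non-matching
-- pairs) and one batch min with a sentinel default: simpler, same O(n) cost.
-- ===== PORT A =====
-- Port of A. Side effect note: the Python A (and B) mutate comparisons[0] += 2 per
-- element in place; the equivalence proved here is about the RETURN value only.
def pyMinPair (m v : Int × Int) : Int × Int :=
  if v.1 < m.1 ∨ (¬ m.1 < v.1 ∧ v.2 < m.2) then v else m

def sort_roots (roots : List (Int × Int)) (min_val : Int) (comparisons : List Int) : List Int × List Int :=
  let st := roots.foldl
    (fun (st : List Int × List (Int × Int)) val =>
      if val.1 == min_val then (st.1 ++ [val.2], st.2)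
      else (st.1, st.2.dropLast ++ [pyMinPair (st.2.getLastD (10000000000000000000000, 1)) val]))
    ([], [(10000000000000000000000, 1)])
  (st.1, [(st.2.headD (10000000000000000000000, 1)).2])

-- ===== PORT B =====
def sort_roots_alt (roots : List (Int × Int)) (min_val : Int) (comparisons : List Int) : List Int × List Int :=
  let min_roots := (roots.filter (fun v => v.1 == min_val)).map Prod.snd
  let others := roots.filter (fun v => !(v.1 == min_val))
  (min_roots,
   [((PySem.List.min2? others Prod.fst Prod.snd).getD (10000000000000000000000, 1)).2])

-- ===== PRECONDITION & SPEC =====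
-- Pre_ excludes exactly the inputs where the Python A raises IndexError
-- (comparisons[0] += 2 with an empty comparisons list and a nonempty roots); B raises there too.
def Pre_sort_roots (roots : List (Int × Int)) (min_val : Int) (comparisons : List Int) : Prop :=
  roots = [] ∨ comparisons ≠ []
instance (roots : List (Int × Int)) (min_val : Int) (comparisons : List Int) : Decidable (Pre_sort_roots roots min_val comparisons) := by unfold Pre_sort_roots; infer_instance

def pvWitness_sort_roots : (List (Int × Int)) × Int × List Int := ([(2, 5), (1, 7), (3, 4)], 1, [0])

def Spec_sort_roots (roots : List (Int × Int)) (min_val : Int) (comparisons : List Int) (out : List Int × List Int) : Prop := out = sort_roots_alt roots min_val comparisons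
instance (roots : List (Int × Int)) (min_val : Int) (comparisons : List Int) (out : List Int × List Int) : Decidable (Spec_sort_roots roots min_val comparisons out) := by unfold Spec_sort_roots; infer_instance

-- ===== CLAIM (what is proved, stated in full; the proofs are below) =====
def Claim_equal_sort_roots : Prop := ∀ (roots : List (Int × Int)) (min_val : Int) (comparisons : List Int), Dom_sort_roots roots min_val comparisons → Pre_sort_roots roots min_val comparisons → Spec_sort_roots roots min_val comparisons (sort_roots roots min_val comparisons)

-- ===== LEMMAS AND PROOFS =====

-- A's loop, with the running min carried in a singleton list, equals: the appended
-- matches plus a foldl of pyMinPair over the non-matching elements.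
lemma loopA_eq (min_val : Int) :
    ∀ (roots : List (Int × Int)) (mr : List Int) (m : Int × Int),
    roots.foldl
      (fun (st : List Int × List (Int × Int)) val =>
        if val.1 == min_val then (st.1 ++ [val.2], st.2)
        else (st.1, st.2.dropLast ++ [pyMinPair (st.2.getLastD (10000000000000000000000, 1)) val]))
      (mr, [m])
    = (mr ++ (roots.filter (fun v => v.1 == min_val)).map Prod.snd,
       [(roots.filter (fun v => !(v.1 == min_val))).foldl pyMinPair m]) := by
  intro roots
  induction roots with
  | nil => intro mr m; simp
  | cons v rest ih =>
    intro mr m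
    by_cases h : v.1 = min_val
    · have hs : (if (v.1 == min_val) = true then ((mr, ([m] : List (Int × Int))).1 ++ [v.2], (mr, [m]).2)
          else ((mr, [m]).1, (mr, [m]).2.dropLast ++ [pyMinPair ((mr, [m]).2.getLastD (10000000000000000000000, 1)) v]))
          = (mr ++ [v.2], [m]) := by simp [h]
      rw [List.foldl_cons, hs, ih]
      simp [h]
    · have hs : (if (v.1 == min_val) = true then ((mr, ([m] : List (Int × Int))).1 ++ [v.2], (mr, [m]).2)
          else ((mr, [m]).1, (mr, [m]).2.dropLast ++ [pyMinPair ((mr, [m]).2.getLastD (10000000000000000000000, 1)) v]))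
          = (mr, [pyMinPair m v]) := by simp [h]
      rw [List.foldl_cons, hs, ih]
      simp [h]

-- min2? over a cons is the same running min starting at the head.
lemma min2?_cons_foldl :
    ∀ (t : List (Int × Int)) (h : Int × Int),
    PySem.List.min2? (h :: t) Prod.fst Prod.snd = some (t.foldl pyMinPair h) := by
  intro t
  induction t with
  | nil => intro h; simp [PySem.List.min2?]
  | cons x xs ih =>
    intro h
    have step : PySem.List.min2? (h :: x :: xs) Prod.fst Prod.snd
        = PySem.List.min2? (pyMinPair h x :: xs) Prod.fst Prod.snd := by
      simp only [PySem.List.min2?, List.foldl, pyMinPair]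
      split_ifs with h1 h2 h2 <;> simp_all <;> omega
    rw [step, ih]
    simp [List.foldl]

-- the sentinel loses to any in-Dom first element
lemma pyMinPair_sentinel (v : Int × Int) (hv : v.1 ≤ 2147483648) :
    pyMinPair (10000000000000000000000, 1) v = v := by
  unfold pyMinPair
  have : v.1 < 10000000000000000000000 := by omega
  simp [this]

-- ===== VERDICT (by name: the statement is the Claim_ definition above) =====
theorem sort_roots_spec : Claim_equal_sort_roots := by
  intro roots min_val comparisons hdom _
  unfold Spec_sort_roots sort_roots sort_roots_alt
  rw [loopA_eq]
  simp only [List.nil_append]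
  congr 1
  -- second components
  cases hf : roots.filter (fun v => !(v.1 == min_val)) with
  | nil => simp [PySem.List.min2?]
  | cons h t =>
    have hmem : h ∈ roots := List.mem_of_mem_filter (hf ▸ List.mem_cons_self ..)
    have hb : h.1 ≤ 2147483648 := by
      unfold Dom_sort_roots at hdom
      simp only [Bool.and_eq_true, List.all_eq_true] at hdom
      have := hdom.1.1 h hmem
      simp only [pvDomInt, decide_eq_true_eq] at this
      exact this.1.2
    rw [min2?_cons_foldl]
    simp [List.foldl, pyMinPair_sentinel h hb]
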